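-- pv_equiv track=rewrite | github.com/samyub/ScriptStream | backend/app/core/markdown.py | _get_tone_guidance
-- ===== SOURCE A (Python) =====
-- def _get_tone_guidance(category: str, prompt: str) -> str:
--     """Return tone instructions based on category and prompt content."""
--     cat = (category or "").lower()
--     p = (prompt or "").lower()
--
--     finance_signals = {"finance", "stock", "invest", "econom", "money", "budget", "crypto", "market"}
--     entertainment_signals = {"gaming", "game", "movie", "film", "entertainment", "lifestyle", "pop", "celebrity", "music"}
--     education_signals = {"education", "learn", "how to", "tutorial", "science", "history", "explain", "technology", "tech"}
--
--     if cat in {"finance", "economics"} or any(s in p for s in finance_signals):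
--         return ("Informational, clear, confident, and authoritative — but still engaging and human. "
--                 "Structured delivery. Avoid hype. Speak to someone smart who wants to understand, not be sold to.")
--     elif cat in {"gaming", "entertainment", "lifestyle"} or any(s in p for s in entertainment_signals):
--         return ("Casual, energetic, conversational, and upbeat. High energy from the first second. "
--                 "Talk like you're catching up with a friend who loves this stuff.")
--     elif cat in {"education", "technology"} or any(s in p for s in education_signals):
--         return ("Clear, engaging, and accessible. Break complex ideas down simply. "
--                 "Keep it interesting — think Kurzgesagt or Veritasium energy.")
--     else:
--         return ("Neutral but engaging and conversational. Friendly but credible. "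
--                 "Adjust naturally to however the topic feels as you write.")
-- ===== SOURCE B (Python) =====
-- _TEXTS = [
--     ("Informational, clear, confident, and authoritative — but still engaging and human. "
--      "Structured delivery. Avoid hype. Speak to someone smart who wants to understand, not be sold to."),
--     ("Casual, energetic, conversational, and upbeat. High energy from the first second. "
--      "Talk like you're catching up with a friend who loves this stuff."),
--     ("Clear, engaging, and accessible. Break complex ideas down simply. "
--      "Keep it interesting — think Kurzgesagt or Veritasium energy."),
--     ("Neutral but engaging and conversational. Friendly but credible. "
--      "Adjust naturally to however the topic feels as you write."),
-- ]
--
-- _CAT_TIER = {"finance": 0, "economics": 0,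
--              "gaming": 1, "entertainment": 1, "lifestyle": 1,
--              "education": 2, "technology": 2}
--
-- _SIG_TIER = {"finance": 0, "stock": 0, "invest": 0, "econom": 0, "money": 0,
--              "budget": 0, "crypto": 0, "market": 0,
--              "gaming": 1, "game": 1, "movie": 1, "film": 1, "entertainment": 1,
--              "lifestyle": 1, "pop": 1, "celebrity": 1, "music": 1,
--              "education": 2, "learn": 2, "how to": 2, "tutorial": 2, "science": 2,
--              "history": 2, "explain": 2, "technology": 2, "tech": 2}
--
--
-- def _get_tone_guidance(category: str, prompt: str) -> str:
--     """Pick the best (lowest) matching priority tier, then index into the texts."""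
--     cat = (category or "").lower()
--     p = (prompt or "").lower()
--     tier = _CAT_TIER.get(cat, 3)
--     for s, t in _SIG_TIER.items():
--         if t < tier and s in p:
--             tier = t
--     return _TEXTS[tier]
-- ===== Notes on version B (the rewrite author's own statement) =====
-- stated objective: alternative
-- what changed: Instead of an if/elif chain of per-branch any() scans, B maps each category and each signal substring to a numeric priority tier, computes the minimum matching tier with a single accumulator pass over the flat signal-to-tier table, and indexes the answer out of a text array; equivalence holds because branch order in A coincides with tier order.
import Mathlib
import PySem

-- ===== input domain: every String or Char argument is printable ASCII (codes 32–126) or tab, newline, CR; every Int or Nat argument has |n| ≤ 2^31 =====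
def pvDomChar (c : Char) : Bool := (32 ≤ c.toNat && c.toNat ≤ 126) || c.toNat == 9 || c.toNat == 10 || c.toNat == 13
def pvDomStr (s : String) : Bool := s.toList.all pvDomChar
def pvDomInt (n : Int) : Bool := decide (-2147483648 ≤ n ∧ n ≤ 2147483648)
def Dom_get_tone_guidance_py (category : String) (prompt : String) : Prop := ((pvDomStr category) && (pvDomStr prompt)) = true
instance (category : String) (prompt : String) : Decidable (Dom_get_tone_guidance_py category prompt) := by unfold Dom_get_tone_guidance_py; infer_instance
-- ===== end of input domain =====

-- B replaces A's if/elif chain of per-branch any() scans by a priority-tier minimisation: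
-- category and signal substrings map to numeric tiers, one accumulator pass over the flat
-- signal table computes the minimum matching tier, and the answer is indexed out of a text
-- array (objective: alternative; same return value on every input).

-- ===== PORT A =====
-- literal transliteration of _get_tone_guidance: (category or "").lower(), the three
-- signal sets, and the if/elif chain in source order.
def get_tone_guidance_py (category : String) (prompt : String) : String :=
  let cat := PySem.Str.lower (if category = "" then "" else category)
  let p := PySem.Str.lower (if prompt = "" then "" else prompt)
  let finance_signals : List String := ["finance", "stock", "invest", "econom", "money", "budget", "crypto", "market"]
  let entertainment_signals : List String := ["gaming", "game", "movie", "film", "entertainment", "lifestyle", "pop", "celebrity", "music"]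
  let education_signals : List String := ["education", "learn", "how to", "tutorial", "science", "history", "explain", "technology", "tech"]
  if (["finance", "economics"] : List String).contains cat || finance_signals.any (fun s => PySem.Str.isIn s p) then
    "Informational, clear, confident, and authoritative — but still engaging and human. Structured delivery. Avoid hype. Speak to someone smart who wants to understand, not be sold to."
  else if (["gaming", "entertainment", "lifestyle"] : List String).contains cat || entertainment_signals.any (fun s => PySem.Str.isIn s p) then
    "Casual, energetic, conversational, and upbeat. High energy from the first second. Talk like you're catching up with a friend who loves this stuff."
  else if (["education", "technology"] : List String).contains cat || education_signals.any (fun s => PySem.Str.isIn s p) then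
    "Clear, engaging, and accessible. Break complex ideas down simply. Keep it interesting — think Kurzgesagt or Veritasium energy."
  else
    "Neutral but engaging and conversational. Friendly but credible. Adjust naturally to however the topic feels as you write."

-- ===== PORT B =====
-- Source B's _TEXTS array, indexed by tier
def pvToneTexts : List String :=
  [ "Informational, clear, confident, and authoritative — but still engaging and human. Structured delivery. Avoid hype. Speak to someone smart who wants to understand, not be sold to.",
    "Casual, energetic, conversational, and upbeat. High energy from the first second. Talk like you're catching up with a friend who loves this stuff.",
    "Clear, engaging, and accessible. Break complex ideas down simply. Keep it interesting — think Kurzgesagt or Veritasium energy.",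
    "Neutral but engaging and conversational. Friendly but credible. Adjust naturally to however the topic feels as you write." ]

-- Source B's _CAT_TIER dict literal: insertions in source order
def pvCatTier : PySem.Dict String Nat :=
  (((((((PySem.Dict.empty.insert "finance" 0).insert "economics" 0).insert "gaming" 1).insert
      "entertainment" 1).insert "lifestyle" 1).insert "education" 2).insert "technology" 2)

-- Source B's _SIG_TIER dict literal: its .items() in insertion order (all keys distinct)
def pvSigTier : List (String × Nat) :=
  [ ("finance", 0), ("stock", 0), ("invest", 0), ("econom", 0), ("money", 0),
    ("budget", 0), ("crypto", 0), ("market", 0),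
    ("gaming", 1), ("game", 1), ("movie", 1), ("film", 1), ("entertainment", 1),
    ("lifestyle", 1), ("pop", 1), ("celebrity", 1), ("music", 1),
    ("education", 2), ("learn", 2), ("how to", 2), ("tutorial", 2), ("science", 2),
    ("history", 2), ("explain", 2), ("technology", 2), ("tech", 2) ]

def get_tone_guidance_py_alt (category : String) (prompt : String) : String :=
  let cat := PySem.Str.lower (if category = "" then "" else category)
  let p := PySem.Str.lower (if prompt = "" then "" else prompt)
  let tier0 := pvCatTier.getD cat 3
  let tier := pvSigTier.foldl (fun tier st => if st.2 < tier && PySem.Str.isIn st.1 p then st.2 else tier) tier0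
  -- _TEXTS[tier]: tier ≤ 3 < len(_TEXTS), so the Python index never raises
  PySem.List.pyGetD pvToneTexts (tier : Int) ""

-- ===== PRECONDITION & SPEC =====
def Spec_get_tone_guidance_py (category : String) (prompt : String) (out : String) : Prop := out = get_tone_guidance_py_alt category prompt
instance (category : String) (prompt : String) (out : String) : Decidable (Spec_get_tone_guidance_py category prompt out) := by unfold Spec_get_tone_guidance_py; infer_instance

-- ===== CLAIM (what is proved, stated in full; the proofs are below) =====
def Claim_equal_get_tone_guidance_py : Prop := ∀ (category : String) (prompt : String), Dom_get_tone_guidance_py category prompt → Spec_get_tone_guidance_py category prompt (get_tone_guidance_py category prompt)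

-- ===== LEMMAS AND PROOFS =====

-- proof helper: the category tier as a 0..3 code
def pvCatCode (cat : String) : Nat :=
  if cat = "finance" ∨ cat = "economics" then 0
  else if cat = "gaming" ∨ cat = "entertainment" ∨ cat = "lifestyle" then 1
  else if cat = "education" ∨ cat = "technology" then 2 else 3

theorem pvCatCode_le (cat : String) : pvCatCode cat ≤ 3 := by
  unfold pvCatCode; split_ifs <;> omega

-- the category dict lookup computes pvCatCode
theorem pvCatTier_getD (cat : String) : pvCatTier.getD cat 3 = pvCatCode cat := by
  simp only [pvCatTier, PySem.Dict.getD_insert, PySem.Dict.getD_empty, pvCatCode]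
  by_cases h1 : cat = "finance" <;> by_cases h2 : cat = "economics" <;>
    by_cases h3 : cat = "gaming" <;> by_cases h4 : cat = "entertainment" <;>
    by_cases h5 : cat = "lifestyle" <;> by_cases h6 : cat = "education" <;>
    by_cases h7 : cat = "technology" <;> simp_all

-- A's three category membership tests, in terms of the code
theorem pv_contains_fin (cat : String) :
    (["finance", "economics"] : List String).contains cat = decide (pvCatCode cat = 0) := by
  unfold pvCatCode
  by_cases h1 : cat = "finance" <;> by_cases h2 : cat = "economics" <;> simp_all <;>
    split_ifs <;> simp_all

theorem pv_contains_ent (cat : String) :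
    (["gaming", "entertainment", "lifestyle"] : List String).contains cat = decide (pvCatCode cat = 1) := by
  unfold pvCatCode
  by_cases h1 : cat = "gaming" <;> by_cases h2 : cat = "entertainment" <;>
    by_cases h3 : cat = "lifestyle" <;> simp_all <;> split_ifs <;> simp_all

theorem pv_contains_edu (cat : String) :
    (["education", "technology"] : List String).contains cat = decide (pvCatCode cat = 2) := by
  unfold pvCatCode
  by_cases h1 : cat = "education" <;> by_cases h2 : cat = "technology" <;> simp_all <;>
    split_ifs <;> simp_all

-- a constant-tier group of the signal table folds to a single any() test
theorem pv_group_fold (p : String) (t : Nat) (sigs : List String) (tier : Nat) :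
    List.foldl (fun tier st => if st.2 < tier && PySem.Str.isIn st.1 p then st.2 else tier) tier
      (sigs.map (fun s => (s, t)))
    = if t < tier && sigs.any (fun s => PySem.Str.isIn s p) then t else tier := by
  induction sigs generalizing tier with
  | nil => simp
  | cons s rest ih =>
    simp only [List.map, List.foldl, List.any_cons, ih]
    by_cases ht : t < tier <;> by_cases hs : PySem.Chars.isIn s.toList p.toList = true <;>
      simp [ht, hs]

-- the signal table is the three constant-tier groups in order
theorem pvSigTier_eq :
    pvSigTier =
      (["finance", "stock", "invest", "econom", "money", "budget", "crypto", "market"].map (fun s => (s, 0)))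
      ++ (["gaming", "game", "movie", "film", "entertainment", "lifestyle", "pop", "celebrity", "music"].map (fun s => (s, 1)))
      ++ (["education", "learn", "how to", "tutorial", "science", "history", "explain", "technology", "tech"].map (fun s => (s, 2))) := rfl

-- ===== VERDICT (by name: the statement is the Claim_ definition above) =====
set_option maxHeartbeats 1000000 in
theorem get_tone_guidance_py_spec : Claim_equal_get_tone_guidance_py := by
  intro category prompt _
  show get_tone_guidance_py category prompt = get_tone_guidance_py_alt category prompt
  simp only [get_tone_guidance_py, get_tone_guidance_py_alt, pvSigTier_eq, List.foldl_append,
    pv_group_fold, pvCatTier_getD, pv_contains_fin, pv_contains_ent, pv_contains_edu,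
    PySem.List.pyGetD_natCast]
  have hle : pvCatCode (PySem.Str.lower (if category = "" then "" else category)) ≤ 3 :=
    pvCatCode_le _
  set p := PySem.Str.lower (if prompt = "" then "" else prompt) with hp
  set c := pvCatCode (PySem.Str.lower (if category = "" then "" else category)) with hc
  clear_value c
  clear hc
  by_cases hF : (["finance", "stock", "invest", "econom", "money", "budget", "crypto", "market"] : List String).any (fun s => PySem.Str.isIn s p) = true <;>
  by_cases hE : (["gaming", "game", "movie", "film", "entertainment", "lifestyle", "pop", "celebrity", "music"] : List String).any (fun s => PySem.Str.isIn s p) = true <;>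
  by_cases hD : (["education", "learn", "how to", "tutorial", "science", "history", "explain", "technology", "tech"] : List String).any (fun s => PySem.Str.isIn s p) = true <;>
  interval_cases c <;> simp_all [pvToneTexts]
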